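-- pv_equiv track=rewrite | github.com/AdirtKa/CryptographyLabs | SPN/spn.py | p_box_permutation
-- ===== SOURCE A (Python) =====
-- def p_box_permutation(bits: int, invert=False) -> int:
--     p_block = [1, 5, 9, 13,
--                2, 6, 10, 14,
--                3, 7, 11, 15,
--                4, 8, 12, 16]
--     p_block = [x - 1 for x in p_block]  # сделаем 0-базовым
--
--     if invert:
--         inv_p = [0] * len(p_block)
--         for i, p in enumerate(p_block):
--             inv_p[p] = i
--         p_block = inv_p
--
--     out = 0
--     for i, pos in enumerate(p_block):
--         bit = (bits >> pos) & 1
--         out |= bit << i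
--     return out
-- ===== SOURCE B (Python) =====
-- def p_box_permutation(bits: int, invert=False) -> int:
--     # The P-box is the transpose of a 4x4 bit matrix, which is its own inverse,
--     # so `invert` needs no separate handling.  Recurse over source bit positions,
--     # consuming one bit of `bits` per step and computing its destination
--     # 4*(src % 4) + src // 4 arithmetically instead of from a table.
--     def go(x: int, src: int) -> int:
--         if src >= 16:
--             return 0
--         return ((x & 1) << (4 * (src % 4) + src // 4)) | go(x >> 1, src + 1)
--     return go(bits, 0)
-- ===== Notes on version B (the rewrite author's own statement) =====
-- stated objective: alternative
-- what changed: B drops A's permutation table and inverse-table-building pass entirely: it recurses over the 16 source positions, consuming the input one bit at a time (x >>= 1 per step) and computing each bit's destination arithmetically as 4*(src % 4) + src // 4, using the fact that the P-box is the 4x4 bit-matrix transpose and therefore its own inverse, so the invert flag needs no branch at all.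
import Mathlib
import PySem

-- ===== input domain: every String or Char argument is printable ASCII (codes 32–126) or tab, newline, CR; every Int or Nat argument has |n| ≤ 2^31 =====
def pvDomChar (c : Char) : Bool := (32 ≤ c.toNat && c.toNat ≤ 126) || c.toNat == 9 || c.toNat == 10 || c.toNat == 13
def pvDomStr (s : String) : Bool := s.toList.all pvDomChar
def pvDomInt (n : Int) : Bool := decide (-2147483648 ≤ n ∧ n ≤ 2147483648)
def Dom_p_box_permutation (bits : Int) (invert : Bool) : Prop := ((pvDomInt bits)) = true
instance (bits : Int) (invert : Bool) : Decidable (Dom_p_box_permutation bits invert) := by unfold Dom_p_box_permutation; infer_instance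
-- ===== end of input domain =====

-- B replaces A's table-plus-inverse-table machinery by a recursive pass that consumes the
-- input one bit at a time and computes each destination arithmetically (the P-box is the
-- 4x4 bit-matrix transpose, its own inverse, so `invert` needs no branch). Objective: alternative.


-- ===== PORT A =====
-- `.toNat` on the store index / shift amounts is exact here: those values are P-box entries, literal 0..15
def p_box_permutation (bits : Int) (invert : Bool) : Int :=
  let p_block : List Int := [1, 5, 9, 13, 2, 6, 10, 14, 3, 7, 11, 15, 4, 8, 12, 16]
  let p_block : List Int := p_block.map (fun x => x - 1)
  let p_block : List Int :=
    if invert then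
      (PySem.List.enumerate p_block).foldl
        (fun inv ip => PySem.List.pySetD inv ip.2 ip.1)
        (List.replicate p_block.length (0 : Int))
    else p_block
  (PySem.List.enumerate p_block).foldl
    (fun out ip => PySem.Int.bor out (PySem.Int.band (bits >>> ip.2.toNat) 1 <<< ip.1.toNat)) 0

-- ===== PORT B =====
-- `go` of Source B; the recursion terminates because src grows towards the guard 16 ≤ src.
-- `.toNat` on the shift amount is exact: 4*(src % 4) + src//4 is 0..15 for the reachable src 0..15.
def pAltGo (x : Int) (src : Int) : Int :=
  if 16 ≤ src then 0
  else PySem.Int.bor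
    ((PySem.Int.band x 1) <<< (4 * PySem.Int.mod src 4 + PySem.Int.floordiv src 4).toNat)
    (pAltGo (x >>> (1 : Nat)) (src + 1))
termination_by (16 - src).toNat
decreasing_by omega

def p_box_permutation_alt (bits : Int) (_invert : Bool) : Int :=
  pAltGo bits 0

-- ===== PRECONDITION & SPEC =====
def Spec_p_box_permutation (bits : Int) (invert : Bool) (out : Int) : Prop := out = p_box_permutation_alt bits invert
instance (bits : Int) (invert : Bool) (out : Int) : Decidable (Spec_p_box_permutation bits invert out) := by unfold Spec_p_box_permutation; infer_instance

-- ===== CLAIM (what is proved, stated in full; the proofs are below) =====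
def Claim_equal_p_box_permutation : Prop := ∀ (bits : Int) (invert : Bool), Dom_p_box_permutation bits invert → Spec_p_box_permutation bits invert (p_box_permutation bits invert)

-- ===== LEMMAS AND PROOFS =====

-- shifting by an Int zero is the identity
theorem pv_sr0 (x : Int) : x >>> (0:Int) = x := (Int.shiftRight_natCast_right x 0).trans (Int.shiftRight_zero x)
theorem pv_sl0 (x : Int) : x <<< (0:Int) = x := (Int.shiftLeft_natCast_right x 0).trans (Int.shiftLeft_zero x)

-- composing Python right-shifts
theorem pv_shr (x : Int) (a b : Nat) : (x >>> a) >>> b = x >>> (a + b) := by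
  simp [Int.shiftRight_eq_div_pow, pow_add, Int.ediv_ediv_of_nonneg]

-- an extracted bit x & 1 is a natural number (it lies in [0, 2))
theorem pv_bit_exists (x : Int) : ∃ n : Nat, PySem.Int.band x 1 = (n : Int) := by
  refine ⟨(PySem.Int.band x 1).toNat, ?_⟩
  rw [PySem.Int.band_one]
  have h := PySem.Int.mod_nonneg (a := x) (b := 2) (by norm_num)
  omega

-- a whole term ((bits >> k) & 1) << i of either loop is a natural number
theorem pv_atom (x k i : Int) (hi : 0 ≤ i) :
    ∃ m : Nat, (PySem.Int.band (x >>> k) 1) <<< i = (m : Int) := by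
  obtain ⟨n, hn⟩ := pv_bit_exists (x >>> k)
  refine ⟨n <<< i.toNat, ?_⟩
  rw [hn, ← Int.toNat_of_nonneg hi, Int.shiftLeft_natCast_right]
  rfl

-- the P-box list A ends up looping over: the inverse table equals the 0-based P-box
-- itself (the permutation is an involution), so both branches of the `if` are this literal
set_option maxRecDepth 8000 in
theorem pv_table_if (invert : Bool) :
    (if invert = true then
      (PySem.List.enumerate (([1, 5, 9, 13, 2, 6, 10, 14, 3, 7, 11, 15, 4, 8, 12, 16] : List Int).map (fun x => x - 1))).foldl
        (fun inv ip => PySem.List.pySetD inv ip.2 ip.1)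
        (List.replicate (([1, 5, 9, 13, 2, 6, 10, 14, 3, 7, 11, 15, 4, 8, 12, 16] : List Int).map (fun x => x - 1)).length (0 : Int))
     else ([1, 5, 9, 13, 2, 6, 10, 14, 3, 7, 11, 15, 4, 8, 12, 16] : List Int).map (fun x => x - 1))
    = [0, 4, 8, 12, 1, 5, 9, 13, 2, 6, 10, 14, 3, 7, 11, 15] := by
  cases invert <;> decide

-- ===== VERDICT (by name: the statement is the Claim_ definition above) =====
set_option maxRecDepth 8000 in
set_option maxHeartbeats 2000000 in
theorem p_box_permutation_spec : Claim_equal_p_box_permutation := by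
  intro bits invert _
  unfold Spec_p_box_permutation p_box_permutation p_box_permutation_alt
  rw [pAltGo]; rw [pAltGo]; rw [pAltGo]; rw [pAltGo]; rw [pAltGo]; rw [pAltGo]
  rw [pAltGo]; rw [pAltGo]; rw [pAltGo]; rw [pAltGo]; rw [pAltGo]; rw [pAltGo]
  rw [pAltGo]; rw [pAltGo]; rw [pAltGo]; rw [pAltGo]; rw [pAltGo]
  simp only [pv_table_if]
  simp only [PySem.List.enumerate_cons, PySem.List.enumerate_nil,
    List.foldl_cons, List.foldl_nil, pv_shr]
  norm_num [PySem.Int.mod_eq_emod_of_pos, PySem.Int.floordiv_eq_ediv_of_pos]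
  simp only [show ((2:Int).toNat) = 2 from rfl, show ((3:Int).toNat) = 3 from rfl,
    show ((4:Int).toNat) = 4 from rfl, show ((5:Int).toNat) = 5 from rfl,
    show ((6:Int).toNat) = 6 from rfl, show ((7:Int).toNat) = 7 from rfl,
    show ((8:Int).toNat) = 8 from rfl, show ((9:Int).toNat) = 9 from rfl,
    show ((10:Int).toNat) = 10 from rfl, show ((11:Int).toNat) = 11 from rfl,
    show ((12:Int).toNat) = 12 from rfl, show ((13:Int).toNat) = 13 from rfl,
    show ((14:Int).toNat) = 14 from rfl, show ((15:Int).toNat) = 15 from rfl,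
    ← Int.shiftRight_natCast_right, ← Int.shiftLeft_natCast_right,
    Nat.cast_ofNat, Nat.cast_one, pv_sr0, pv_sl0]
  obtain ⟨m0, g0⟩ := pv_bit_exists bits
  obtain ⟨m1, g1⟩ := pv_atom bits 1 4 (by norm_num)
  obtain ⟨m2, g2⟩ := pv_atom bits 2 8 (by norm_num)
  obtain ⟨m3, g3⟩ := pv_atom bits 3 12 (by norm_num)
  obtain ⟨m4, g4⟩ := pv_atom bits 4 1 (by norm_num)
  obtain ⟨m5, g5⟩ := pv_atom bits 5 5 (by norm_num)
  obtain ⟨m6, g6⟩ := pv_atom bits 6 9 (by norm_num)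
  obtain ⟨m7, g7⟩ := pv_atom bits 7 13 (by norm_num)
  obtain ⟨m8, g8⟩ := pv_atom bits 8 2 (by norm_num)
  obtain ⟨m9, g9⟩ := pv_atom bits 9 6 (by norm_num)
  obtain ⟨m10, g10⟩ := pv_atom bits 10 10 (by norm_num)
  obtain ⟨m11, g11⟩ := pv_atom bits 11 14 (by norm_num)
  obtain ⟨m12, g12⟩ := pv_atom bits 12 3 (by norm_num)
  obtain ⟨m13, g13⟩ := pv_atom bits 13 7 (by norm_num)
  obtain ⟨m14, g14⟩ := pv_atom bits 14 11 (by norm_num)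
  obtain ⟨m15, g15⟩ := pv_atom bits 15 15 (by norm_num)
  rw [g0, g1, g2, g3, g4, g5, g6, g7, g8, g9, g10, g11, g12, g13, g14, g15]
  simp only [show (0:Int) = ((0:Nat):Int) from rfl, PySem.Int.bor_natCast, Nat.cast_inj]
  ac_rfl
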